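-- pv_equiv track=rewrite | github.com/daturkel/advent-of-code-2021 | 12/12a.py | paths_to_here
-- ===== SOURCE A (Python) =====
-- def paths_to_here(
--     here: str, edges: list[tuple[str, str]], visited: list[str] = None
-- ) -> int:
--     if visited is None:
--         visited = ["end"]
--
--     if here == "start":
--         return 1
--
--     edges_to_here = [(a, b) for (a, b) in edges if (b == here) and (a not in visited)]
--
--     num = 0
--     for location, _ in edges_to_here:
--         if location == location.lower():
--             num += paths_to_here(location, edges, visited + [location])
--         else:
--             num += paths_to_here(location, edges, visited)
--
--     return num
-- ===== SOURCE B (Python) =====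
-- def paths_to_here(
--     here: str, edges: list[tuple[str, str]], visited: list[str] = None
-- ) -> int:
--     if visited is None:
--         visited = ["end"]
--
--     count = 0
--     frontier = [(here, visited)]
--     while frontier:
--         next_frontier = []
--         for node, seen in frontier:
--             if node == "start":
--                 count += 1
--             else:
--                 for a, b in edges:
--                     if b == node and a not in seen:
--                         if a == a.lower():
--                             next_frontier.append((a, seen + [a]))
--                         else:
--                             next_frontier.append((a, seen))
--         frontier = next_frontier
--     return count
-- ===== Notes on version B (the rewrite author's own statement) =====
-- stated objective: alternative
-- what changed: B replaces A's recursive DFS with an iterative breadth-first frontier loop: it keeps a list of partial-path states (node, visited), expands the whole frontier one round at a time, and counts the states that reach 'start'; there is no recursion at all.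
import Mathlib
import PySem

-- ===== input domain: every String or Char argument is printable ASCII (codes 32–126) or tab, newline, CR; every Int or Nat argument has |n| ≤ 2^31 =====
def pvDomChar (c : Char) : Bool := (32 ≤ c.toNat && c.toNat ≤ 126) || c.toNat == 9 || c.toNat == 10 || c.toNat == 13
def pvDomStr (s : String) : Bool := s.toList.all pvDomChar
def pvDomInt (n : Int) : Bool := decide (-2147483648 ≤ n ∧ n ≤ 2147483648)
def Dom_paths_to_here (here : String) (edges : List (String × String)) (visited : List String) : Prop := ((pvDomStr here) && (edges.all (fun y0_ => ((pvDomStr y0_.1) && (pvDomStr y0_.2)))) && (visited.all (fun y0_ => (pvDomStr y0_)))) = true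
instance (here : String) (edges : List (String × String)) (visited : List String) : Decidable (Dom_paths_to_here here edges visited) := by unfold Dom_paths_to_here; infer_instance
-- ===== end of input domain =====

-- B replaces A's recursive DFS with an iterative breadth-first frontier loop over partial-path
-- states, counting states that reach "start" (objective: alternative).


-- ===== PORT A =====
-- A's recursion need not terminate (it can cycle through big caves), so the port carries a fuel
-- guard; 2*|edges|+2 bounds the recursion depth whenever Python A terminates (no two adjacent
-- big caves), and at fuel 0 the guard returns 0.
def pathsToHereA (edges : List (String × String)) : Nat → String → List String → Int
  | 0, _, _ => 0
  | fuel + 1, here, visited =>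
    if here == "start" then 1
    else
      let edges_to_here := edges.filter (fun p => p.2 == here && !(visited.contains p.1))
      edges_to_here.foldl (fun num p =>
        if p.1 == PySem.Str.lower p.1 then
          num + pathsToHereA edges fuel p.1 (visited ++ [p.1])
        else
          num + pathsToHereA edges fuel p.1 visited) 0

def paths_to_here (here : String) (edges : List (String × String)) (visited : List String) : Int :=
  pathsToHereA edges (2 * edges.length + 2) here visited

-- ===== PORT B =====
-- B's while loop: each round folds over the frontier carrying (count, next_frontier); the inner
-- for-loop over edges appends the successor states. The while loop has no bound in Python; the
-- port runs it for 2*|edges|+2 rounds, enough whenever Python B terminates (round = path step).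
def bfsB (edges : List (String × String)) : Nat → Int → List (String × List String) → Int
  | 0, count, _ => count
  | fuel + 1, count, frontier =>
    if frontier.isEmpty then count
    else
      let r := frontier.foldl (fun (acc : Int × List (String × List String)) st =>
        if st.1 == "start" then (acc.1 + 1, acc.2)
        else (acc.1, edges.foldl (fun nf p =>
            if p.2 == st.1 && !(st.2.contains p.1) then
              nf ++ [if p.1 == PySem.Str.lower p.1 then (p.1, st.2 ++ [p.1]) else (p.1, st.2)]
            else nf) acc.2)) (count, [])
      bfsB edges fuel r.1 r.2

def paths_to_here_alt (here : String) (edges : List (String × String)) (visited : List String) : Int :=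
  bfsB edges (2 * edges.length + 2) 0 [(here, visited)]

-- ===== SPEC =====
def Spec_paths_to_here (here : String) (edges : List (String × String)) (visited : List String) (out : Int) : Prop := out = paths_to_here_alt here edges visited
instance (here : String) (edges : List (String × String)) (visited : List String) (out : Int) : Decidable (Spec_paths_to_here here edges visited out) := by unfold Spec_paths_to_here; infer_instance

-- ===== CLAIM =====
def Claim_equal_paths_to_here : Prop := ∀ (here : String) (edges : List (String × String)) (visited : List String), Dom_paths_to_here here edges visited → Spec_paths_to_here here edges visited (paths_to_here here edges visited)

-- ===== LEMMAS AND PROOFS =====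

-- the successor states one frontier entry produces (proof-side abbreviation of B's inner loop)
def expandB (edges : List (String × String)) (st : String × List String) : List (String × List String) :=
  (edges.filter (fun p => p.2 == st.1 && !(st.2.contains p.1))).map
    (fun p => if p.1 == PySem.Str.lower p.1 then (p.1, st.2 ++ [p.1]) else (p.1, st.2))

-- A's one-step unfolding as a sum over the successor states
lemma A_step (edges : List (String × String)) (fuel : Nat) (n : String) (v : List String)
    (hn : (n == "start") = false) :
    pathsToHereA edges (fuel + 1) n v
      = ((expandB edges (n, v)).map (fun st => pathsToHereA edges fuel st.1 st.2)).sum := by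
  simp only [pathsToHereA, hn, Bool.false_eq_true, if_false]
  have hbody : (fun (num : Int) (p : String × String) =>
      if p.1 == PySem.Str.lower p.1 then
        num + pathsToHereA edges fuel p.1 (v ++ [p.1])
      else
        num + pathsToHereA edges fuel p.1 v)
      = (fun (num : Int) p => num +
          (pathsToHereA edges fuel
            (if p.1 == PySem.Str.lower p.1 then (p.1, v ++ [p.1]) else (p.1, v)).1
            (if p.1 == PySem.Str.lower p.1 then (p.1, v ++ [p.1]) else (p.1, v)).2)) := by
    funext num p; split <;> rfl
  rw [hbody, PySem.List.foldl_add, zero_add]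
  simp [expandB, List.map_map, Function.comp_def]

-- B's per-round fold characterized: it adds the number of "start" states to count and
-- concatenates the expansions of the other states
lemma fold_step (edges : List (String × String)) (frontier : List (String × List String))
    (c : Int) (acc : List (String × List String)) :
    frontier.foldl (fun (acc : Int × List (String × List String)) st =>
        if st.1 == "start" then (acc.1 + 1, acc.2)
        else (acc.1, edges.foldl (fun nf p =>
            if p.2 == st.1 && !(st.2.contains p.1) then
              nf ++ [if p.1 == PySem.Str.lower p.1 then (p.1, st.2 ++ [p.1]) else (p.1, st.2)]
            else nf) acc.2)) (c, acc)
      = (c + (frontier.countP (fun st => st.1 == "start") : Int),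
         acc ++ frontier.flatMap (fun st => if st.1 == "start" then [] else expandB edges st)) := by
  induction frontier generalizing c acc with
  | nil => simp
  | cons st rest ih =>
    simp only [List.foldl_cons, List.countP_cons, List.flatMap_cons]
    by_cases h : st.1 == "start"
    · simp only [h, if_true, ih, List.nil_append]
      congr 1
      push_cast
      ring
    · have h' : (st.1 == "start") = false := by simpa using h
      simp only [h', Bool.false_eq_true, if_false]
      rw [PySem.List.foldl_append_if, ih]
      simp [expandB]

-- one round of expansion preserves the A-valued sum, dropping one unit of fuel
lemma sum_step (edges : List (String × String)) (fuel : Nat)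
    (frontier : List (String × List String)) :
    (frontier.map (fun st => pathsToHereA edges (fuel + 1) st.1 st.2)).sum
      = (frontier.countP (fun st => st.1 == "start") : Int)
        + ((frontier.flatMap (fun st => if st.1 == "start" then [] else expandB edges st)).map
            (fun st => pathsToHereA edges fuel st.1 st.2)).sum := by
  induction frontier with
  | nil => simp
  | cons st rest ih =>
    simp only [List.map_cons, List.sum_cons, List.countP_cons, List.flatMap_cons, List.map_append,
      List.sum_append]
    by_cases h : st.1 == "start"
    · have h1 : pathsToHereA edges (fuel + 1) st.1 st.2 = 1 := by
        simp [pathsToHereA, h]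
      simp only [h, if_true, h1, List.map_nil, List.sum_nil]
      push_cast
      omega
    · have h' : (st.1 == "start") = false := by simpa using h
      rw [A_step edges fuel st.1 st.2 h']
      simp only [h', Bool.false_eq_true, if_false, ih]
      push_cast
      ring

-- the invariant of B's while loop: count + what the frontier is still worth (A-valued, at the
-- remaining fuel)
lemma bfsB_inv (edges : List (String × String)) :
    ∀ (fuel : Nat) (c : Int) (frontier : List (String × List String)),
      bfsB edges fuel c frontier
        = c + (frontier.map (fun st => pathsToHereA edges fuel st.1 st.2)).sum := by
  intro fuel
  induction fuel with
  | zero =>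
    intro c frontier
    simp [bfsB, pathsToHereA]
  | succ fuel ih =>
    intro c frontier
    simp only [bfsB]
    by_cases he : frontier.isEmpty
    · rw [List.isEmpty_iff.mp he]; simp
    · have he' : frontier.isEmpty = false := by simpa using he
      simp only [he', Bool.false_eq_true, if_false]
      rw [fold_step, ih, sum_step]
      simp only [List.nil_append]
      ring

lemma paths_eq (here : String) (edges : List (String × String)) (visited : List String) :
    paths_to_here here edges visited = paths_to_here_alt here edges visited := by
  unfold paths_to_here paths_to_here_alt
  rw [bfsB_inv]
  simp

-- ===== VERDICT =====
theorem paths_to_here_spec : Claim_equal_paths_to_here := by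
  intro here edges visited _
  exact paths_eq here edges visited
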